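-- pv_equiv track=rewrite | github.com/mahmoud/wapiti | wapiti/hematite/serdes.py | list_header_from_bytes
-- ===== SOURCE A (Python) =====
-- def unquote_header_value(value):
--     # watch out for certain cases with filenames
--     if value and value[0] == value[-1] == '"':
--         value = value[1:-1]
--         #if not is_filename or value[:2] != '\\\\':
--         return value.replace('\\\\', '\\').replace('\\"', '"')
--     return value
--
-- def list_header_from_bytes(val, unquote=True):
--     "e.g., Accept-Ranges. skips blank values, per the RFC."
--     ret = []
--     for v in _list_header_from_bytes(val):
--         if not v:
--             continue
--         if unquote and v[0] == '"' == v[-1]: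
--             v = unquote_header_value(v)
--         ret.append(v)
--     return ret
--
-- def _list_header_from_bytes(bytestr, sep=None):
--     """Parse lists as described by RFC 2068 Section 2.
--
--     In particular, parse comma-separated lists where the elements of
--     the list may include quoted-strings.  A quoted-string could
--     contain a comma.  A non-quoted string could have quotes in the
--     middle.  Neither commas nor quotes count if they are escaped.
--     Only double-quotes count, not single-quotes.
--
--     (based on urllib2 from the stdlib)
--     """
--     bytestr = bytestr.strip()
--     res, part, sep = [], '', sep or ','
--
--     escape = quote = False
--     for cur in bytestr:
--         if escape:
--             part += cur
--             escape = False
--             continue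
--         if quote:
--             if cur == '\\':
--                 escape = True
--                 continue
--             elif cur == '"':
--                 quote = False
--             part += cur
--             continue
--
--         if cur == sep:
--             res.append(part)
--             part = ''
--             continue
--
--         if cur == '"':
--             quote = True
--
--         part += cur
--
--     # append last part
--     if part:
--         res.append(part)
--
--     return [part.strip() for part in res]
-- ===== SOURCE B (Python) =====
-- def unquote_header_value(value):
--     if value and value[0] == value[-1] == '"':
--         value = value[1:-1]
--         return value.replace('\\\\', '\\').replace('\\"', '"')
--     return value
--
--
-- def _lex(s):
--     """Stage 1: tokenize into a flat token stream.
--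
--     Tokens are (is_sep, text): separators, quoted-string tokens (with
--     backslash escapes inside the quotes already resolved: the backslash is
--     dropped and the next char kept literally), and maximal runs of plain text.
--     """
--     toks = []
--     i, n = 0, len(s)
--     while i < n:
--         c = s[i]
--         if c == ',':
--             toks.append((True, ','))
--             i += 1
--         elif c == '"':
--             buf = ['"']
--             i += 1
--             while i < n:
--                 q = s[i]
--                 if q == '\\':
--                     i += 1
--                     if i < n:
--                         buf.append(s[i])
--                         i += 1
--                 elif q == '"':
--                     buf.append(q)
--                     i += 1
--                     break
--                 else:
--                     buf.append(q)
--                     i += 1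
--             toks.append((False, ''.join(buf)))
--         else:
--             j = i
--             while j < n and s[j] != ',' and s[j] != '"':
--                 j += 1
--             toks.append((False, s[i:j]))
--             i = j
--     return toks
--
--
-- def _group(toks):
--     """Stage 2: split the token stream on separator tokens."""
--     parts, cur = [], ''
--     for is_sep, text in toks:
--         if is_sep:
--             parts.append(cur)
--             cur = ''
--         else:
--             cur += text
--     if cur:
--         parts.append(cur)
--     return parts
--
--
-- def list_header_from_bytes(val, unquote=True):
--     "e.g., Accept-Ranges. skips blank values, per the RFC."
--     parts = _group(_lex(val.strip()))
--     ret = []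
--     for p in parts:
--         v = p.strip()
--         if not v:
--             continue
--         if unquote and v[0] == '"' == v[-1]:
--             v = unquote_header_value(v)
--         ret.append(v)
--     return ret
-- ===== Notes on version B (the rewrite author's own statement) =====
-- stated objective: alternative
-- what changed: Replaces A's single-pass three-boolean-flag state machine with a staged pipeline: a lexer first turns the input into a token stream (separator tokens, quoted-string tokens with escapes already resolved, maximal plain-text runs), and a second pass groups that stream into parts by splitting on separator tokens.
import Mathlib
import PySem

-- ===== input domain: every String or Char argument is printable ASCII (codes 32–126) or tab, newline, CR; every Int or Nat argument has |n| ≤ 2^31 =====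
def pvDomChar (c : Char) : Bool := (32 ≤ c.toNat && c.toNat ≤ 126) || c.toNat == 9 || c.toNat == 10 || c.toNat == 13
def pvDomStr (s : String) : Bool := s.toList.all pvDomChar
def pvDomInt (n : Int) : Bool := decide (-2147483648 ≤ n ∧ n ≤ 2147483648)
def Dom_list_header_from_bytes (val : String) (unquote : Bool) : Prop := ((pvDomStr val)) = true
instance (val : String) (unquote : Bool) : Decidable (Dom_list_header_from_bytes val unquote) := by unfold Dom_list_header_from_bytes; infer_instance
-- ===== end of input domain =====

-- B replaces A's one-pass three-flag state machine by two staged passes: a lexer producing a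
-- token stream (separators / quoted strings with escapes resolved / plain-text runs) and a
-- grouping pass splitting that stream on separators; objective: alternative (no speed claim).

-- shared helper: unquote_header_value (identical Python code in A's module and in B)
def unquoteHV (v : List Char) : List Char :=
  if v ≠ [] ∧ PySem.List.pyGet? v 0 = some '"' ∧ PySem.List.pyGet? v (-1) = some '"' then
    PySem.Chars.replace (PySem.Chars.replace (PySem.Chars.slice v (some 1) (some (-1)))
      ['\\','\\'] ['\\']) ['\\','"'] ['"']
  else v

-- shared helper: the body of the final filtering loop (identical Python code in A and B)
def finishPart (unquote : Bool) (v : List Char) : String :=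
  String.ofList (if unquote ∧ PySem.List.pyGet? v 0 = some '"' ∧ PySem.List.pyGet? v (-1) = some '"'
                 then unquoteHV v else v)

-- ===== PORT A =====
-- A's character loop: state (res, part, escape, quote), exactly the Python branches in order
def loopA : List Char → List (List Char) → List Char → Bool → Bool → List (List Char)
  | [], res, part, _, _ => if part = [] then res else res ++ [part]
  | c :: rest, res, part, escape, quote =>
    if escape = true then loopA rest res (part ++ [c]) false quote
    else if quote = true then
      if c = '\\' then loopA rest res part true quote
      else if c = '"' then loopA rest res (part ++ [c]) escape false
      else loopA rest res (part ++ [c]) escape quote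
    else if c = ',' then loopA rest (res ++ [part]) [] escape quote
    else if c = '"' then loopA rest res (part ++ [c]) escape true
    else loopA rest res (part ++ [c]) escape quote

def list_header_from_bytes (val : String) (unquote : Bool) : List String :=
  -- _list_header_from_bytes: strip, run the flag loop, strip each part
  let parts := (loopA (PySem.Chars.strip val.toList) [] [] false false).map PySem.Chars.strip
  -- main loop: skip blanks, unquote quoted values
  parts.foldl (fun ret v => if v = [] then ret else ret ++ [finishPart unquote v]) []

-- ===== PORT B =====
-- B stage 1a: the quoted-string sub-lexer (backslash dropped, next char copied literally;
-- unescaped '"' appended and the lexer exits), returning the copied chars and the rest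
def inQ : List Char → List Char × List Char
  | [] => ([], [])
  | q :: rest =>
    if q = '\\' then
      match rest with
      | [] => ([], [])
      | x :: rest' => (x :: (inQ rest').1, (inQ rest').2)
    else if q = '"' then ([q], rest)
    else (q :: (inQ rest).1, (inQ rest).2)

-- B stage 1b: a maximal run of plain text (no ',' or '"'), returning (run, rest)
def runTxt : List Char → List Char × List Char
  | [] => ([], [])
  | c :: r => if c = ',' ∨ c = '"' then ([], c :: r)
              else (c :: (runTxt r).1, (runTxt r).2)

-- termination helpers for lexB (cited by the port's decreasing_by)
theorem inQ_snd_length : ∀ l : List Char, (inQ l).2.length ≤ l.length := by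
  intro l
  fun_induction inQ l <;> simp_all <;> omega

theorem runTxt_snd_length : ∀ l : List Char, (runTxt l).2.length ≤ l.length := by
  intro l
  fun_induction runTxt l <;> simp_all <;> omega

-- B stage 1: the token stream — (true, ",") separators, quoted tokens, text-run tokens
def lexB : List Char → List (Bool × List Char)
  | [] => []
  | c :: rest =>
    if c = ',' then (true, [',']) :: lexB rest
    else if c = '"' then (false, '"' :: (inQ rest).1) :: lexB (inQ rest).2
    else (false, c :: (runTxt rest).1) :: lexB (runTxt rest).2
termination_by l => l.length
decreasing_by
  all_goals simp
  · have := inQ_snd_length rest; omega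
  · have := runTxt_snd_length rest; omega

-- B stage 2: split the token stream on separator tokens
def groupB : List (Bool × List Char) → List Char → List (List Char) → List (List Char)
  | [], cur, parts => if cur = [] then parts else parts ++ [cur]
  | (isSep, text) :: toks, cur, parts =>
    if isSep then groupB toks [] (parts ++ [cur])
    else groupB toks (cur ++ text) parts

def list_header_from_bytes_alt (val : String) (unquote : Bool) : List String :=
  let parts := groupB (lexB (PySem.Chars.strip val.toList)) [] []
  parts.foldl (fun ret p =>
    if PySem.Chars.strip p = [] then ret
    else ret ++ [finishPart unquote (PySem.Chars.strip p)]) []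

-- ===== PRECONDITION & SPEC =====
def Spec_list_header_from_bytes (val : String) (unquote : Bool) (out : List String) : Prop := out = list_header_from_bytes_alt val unquote
instance (val : String) (unquote : Bool) (out : List String) : Decidable (Spec_list_header_from_bytes val unquote out) := by unfold Spec_list_header_from_bytes; infer_instance

-- ===== CLAIM (what is proved, stated in full; the proofs are below) =====
def Claim_equal_list_header_from_bytes : Prop := ∀ (val : String) (unquote : Bool), Dom_list_header_from_bytes val unquote → Spec_list_header_from_bytes val unquote (list_header_from_bytes val unquote)

-- ===== LEMMAS AND PROOFS =====

theorem inQ_quote (rest : List Char) : inQ ('"' :: rest) = (['"'], rest) := by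
  rw [inQ.eq_def]; simp

theorem inQ_esc_nil : inQ ['\\'] = ([], []) := by decide

theorem inQ_esc (x : Char) (r : List Char) : inQ ('\\' :: x :: r) = (x :: (inQ r).1, (inQ r).2) := by
  rw [inQ.eq_def]; simp

theorem inQ_other {c : Char} (h1 : ¬ c = '\\') (h2 : ¬ c = '"') (rest : List Char) :
    inQ (c :: rest) = (c :: (inQ rest).1, (inQ rest).2) := by
  rw [inQ.eq_def]; simp [h1, h2]

-- Inside a quote, A's flag loop copies exactly what B's quoted-string lexer emits.
theorem loopA_quote : ∀ (n : Nat) (l : List Char), l.length ≤ n →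
    ∀ (res : List (List Char)) (part : List Char),
    loopA l res part false true = loopA (inQ l).2 res (part ++ (inQ l).1) false false := by
  intro n
  induction n with
  | zero =>
    intro l hl res part
    have : l = [] := List.eq_nil_of_length_eq_zero (Nat.le_zero.mp hl)
    subst this; simp [inQ, loopA]
  | succ n ih =>
    intro l hl res part
    match l with
    | [] => simp [inQ, loopA]
    | c :: rest =>
      simp only [List.length_cons, Nat.succ_le_succ_iff] at hl
      by_cases hb : c = '\\'
      · subst hb
        match rest with
        | [] => rw [inQ_esc_nil]; simp [loopA]
        | x :: rest' =>
          simp only [List.length_cons] at hl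
          rw [inQ_esc]
          simp only [loopA]
          rw [ih rest' (by omega) res (part ++ [x])]
          simp
      · by_cases hq : c = '"'
        · subst hq
          rw [inQ_quote]
          simp [loopA]
        · rw [inQ_other hb hq]
          simp only [loopA, if_neg hb, if_neg hq, Bool.false_eq_true, if_false, if_true]
          rw [ih rest hl res (part ++ [c])]
          simp

-- Over a plain-text run, A's loop copies exactly what runTxt emits.
theorem loopA_run : ∀ (l : List Char) (res : List (List Char)) (part : List Char),
    loopA l res part false false = loopA (runTxt l).2 res (part ++ (runTxt l).1) false false := by
  intro l
  induction l with
  | nil => simp [runTxt]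
  | cons c rest ih =>
    intro res part
    by_cases hs : c = ',' ∨ c = '"'
    · simp [runTxt, hs]
    · push Not at hs
      simp only [runTxt, if_neg (by tauto : ¬ (c = ',' ∨ c = '"'))]
      simp only [loopA, Bool.false_eq_true, if_false, if_neg hs.1, if_neg hs.2]
      rw [ih res (part ++ [c])]
      simp

-- A's loop in normal state equals grouping B's token stream.
theorem loopA_eq_group : ∀ (n : Nat) (l : List Char), l.length ≤ n →
    ∀ (res : List (List Char)) (part : List Char),
    loopA l res part false false = groupB (lexB l) part res := by
  intro n
  induction n with
  | zero =>
    intro l hl res part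
    have : l = [] := List.eq_nil_of_length_eq_zero (Nat.le_zero.mp hl)
    subst this; simp [loopA, lexB, groupB]
  | succ n ih =>
    intro l hl res part
    match l with
    | [] => simp [loopA, lexB, groupB]
    | c :: rest =>
      simp only [List.length_cons, Nat.succ_le_succ_iff] at hl
      by_cases hs : c = ','
      · subst hs
        simp only [loopA, lexB, groupB, Bool.false_eq_true, if_false, if_true]
        exact ih rest hl (res ++ [part]) []
      · by_cases hq : c = '"'
        · subst hq
          have hnotsep : ('"' : Char) ≠ ',' := by decide
          rw [lexB.eq_def]
          simp only [loopA, groupB, Bool.false_eq_true, if_false, if_neg hnotsep, if_true]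
          rw [loopA_quote rest.length rest le_rfl res (part ++ ['"'])]
          have hl2 : (inQ rest).2.length ≤ n := le_trans (inQ_snd_length rest) hl
          rw [ih _ hl2 res _]
          simp
        · rw [lexB.eq_def]
          simp only [loopA, groupB, Bool.false_eq_true, if_false, if_neg hs, if_neg hq]
          rw [loopA_run rest res (part ++ [c])]
          have hl2 : (runTxt rest).2.length ≤ n := le_trans (runTxt_snd_length rest) hl
          rw [ih _ hl2 res _]
          simp

-- ===== VERDICT (by name: the statement is the Claim_ definition above) =====
theorem list_header_from_bytes_spec : Claim_equal_list_header_from_bytes := by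
  unfold Claim_equal_list_header_from_bytes
  intro val unquote _
  unfold Spec_list_header_from_bytes list_header_from_bytes list_header_from_bytes_alt
  rw [loopA_eq_group (PySem.Chars.strip val.toList).length _ le_rfl]
  simp [List.foldl_map]
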